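-- pv_equiv track=rewrite | github.com/llauragonzalezz/pyANAGRA | conjuntos.py | calculate_first_set_sentence_fs
-- ===== SOURCE A (Python) =====
-- def calculate_first_set_sentence_fs(elements, first_set):
--     """
--         Calculates the 'first' set of a given sentence form in the context of a grammar.
--
--         Parameters
--         ----------
--         elements: set
--             A set containing the tokens of the sentence form.
--
--         first_set : dict
--             A dictionary containing the 'first' of the grammar.
--
--         Returns
--         -------
--         set
--             A set containing the 'first' set of the given sentence form.
--         """
--     first_set_sentence = set()
--     epsilon = True
--     # Iterate over elements of a given sentence form
--     for element in elements:
--         first_set_sentence |= first_set[element].difference({None})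
--         if None not in first_set[element]:
--             epsilon = False
--             break
--
--     # Only add epsilon if all tokens have epsilon in their first set
--     if epsilon:
--         first_set_sentence.add(None)
--
--     return first_set_sentence
-- ===== SOURCE B (Python) =====
-- def calculate_first_set_sentence_fs(elements, first_set):
--     # Right fold of the textbook recurrence:
--     # FIRST(X beta) = (FIRST(X) - {eps}) | (FIRST(beta) if eps in FIRST(X) else {}),
--     # FIRST(empty) = {eps}; no break, no epsilon flag.
--     first = {None}
--     for element in reversed(list(elements)):
--         fe = first_set.get(element, set())
--         first = (fe - {None}) | first if None in fe else fe - {None}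
--     return first
-- ===== Notes on version B (the rewrite author's own statement) =====
-- stated objective: alternative
-- what changed: Replaces A's left-to-right loop with a mutable set, an epsilon flag and an early break by a single right-to-left fold of the textbook recurrence FIRST(X beta) = (FIRST(X)-{eps}) | (FIRST(beta) if eps in FIRST(X) else {}); B uses first_set.get(e, set()) so it never raises, and Pre_ excludes exactly the inputs where A raises KeyError.
import Mathlib
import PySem

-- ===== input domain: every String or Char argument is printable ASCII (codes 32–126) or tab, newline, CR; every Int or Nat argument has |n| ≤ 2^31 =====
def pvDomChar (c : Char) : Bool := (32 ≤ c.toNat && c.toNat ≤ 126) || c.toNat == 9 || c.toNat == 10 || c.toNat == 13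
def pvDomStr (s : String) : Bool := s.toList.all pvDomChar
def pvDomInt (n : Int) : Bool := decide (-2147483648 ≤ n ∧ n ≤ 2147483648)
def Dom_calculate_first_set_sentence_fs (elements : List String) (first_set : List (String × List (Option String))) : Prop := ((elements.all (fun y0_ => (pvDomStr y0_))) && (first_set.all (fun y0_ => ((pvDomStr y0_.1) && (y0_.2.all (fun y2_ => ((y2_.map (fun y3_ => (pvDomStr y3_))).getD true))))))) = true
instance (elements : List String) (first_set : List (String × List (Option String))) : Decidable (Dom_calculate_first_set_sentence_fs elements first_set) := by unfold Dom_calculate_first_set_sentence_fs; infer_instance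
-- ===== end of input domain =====

-- B replaces A's left-to-right loop (mutable accumulator, epsilon flag, early break) by a single
-- right-to-left fold of the textbook recurrence FIRST(Xβ) = (FIRST(X)∖{ε}) ∪ (FIRST(β) if ε∈FIRST(X) else ∅).

-- ===== PORT A =====
-- dict lookup first_set[element]; total form, used only under Pre_ (KeyError excluded there)
def pvFsGet (first_set : List (String × List (Option String))) (e : String) : List (Option String) :=
  (PySem.Dict.mk first_set).getD e []

def pvALoop (first_set : List (String × List (Option String))) :
    List String → PySem.Set (Option String) → PySem.Set (Option String)
  | [], acc => PySem.Set.add acc none            -- epsilon still True: add None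
  | e :: rest, acc =>
    let fe := pvFsGet first_set e
    let acc' := PySem.Set.union acc (PySem.Set.diff fe [none])
    if !fe.contains none then acc'               -- epsilon = False; break
    else pvALoop first_set rest acc'

def calculate_first_set_sentence_fs (elements : List String) (first_set : List (String × List (Option String))) : List (Option String) :=
  pvALoop first_set elements PySem.Set.empty

-- ===== PORT B =====
-- the body of B's loop: first = (fe - {None}) | first if None in fe else fe - {None},
-- with fe = first_set.get(element, set())
def pvG (first_set : List (String × List (Option String))) (element : String)
    (first : List (Option String)) : List (Option String) :=
  let fe := (PySem.Dict.mk first_set).getD element []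
  if fe.contains none then
    PySem.Set.union (PySem.Set.diff (PySem.Set.ofList fe) [none]) first
  else
    PySem.Set.diff (PySem.Set.ofList fe) [none]

-- one loop over reversed(elements) starting from {None}
def calculate_first_set_sentence_fs_alt (elements : List String) (first_set : List (String × List (Option String))) : List (Option String) :=
  elements.reverse.foldl (fun first element => pvG first_set element first) [none]

-- ===== PRECONDITION & SPEC =====
-- Pre_ excludes exactly the inputs on which Python A raises KeyError: some element the loop
-- actually reaches (every earlier element has an entry whose first set contains None) has no
-- entry in first_set.
def Pre_calculate_first_set_sentence_fs (elements : List String) (first_set : List (String × List (Option String))) : Prop :=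
  ∀ i, i < elements.length →
    (∀ j, j < i →
      ((first_set.find? (fun p => p.1 == elements.getD j "")).isSome = true ∧
       none ∈ pvFsGet first_set (elements.getD j ""))) →
    (first_set.find? (fun p => p.1 == elements.getD i "")).isSome = true
instance (elements : List String) (first_set : List (String × List (Option String))) : Decidable (Pre_calculate_first_set_sentence_fs elements first_set) := by unfold Pre_calculate_first_set_sentence_fs; infer_instance

def pvWitness_calculate_first_set_sentence_fs : List String × (List (String × List (Option String))) :=
  (["A", "B"], [("A", [some "x", none]), ("B", [some "y"])])

def Spec_calculate_first_set_sentence_fs (elements : List String) (first_set : List (String × List (Option String))) (out : List (Option String)) : Prop := out = calculate_first_set_sentence_fs_alt elements first_set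
instance (elements : List String) (first_set : List (String × List (Option String))) (out : List (Option String)) : Decidable (Spec_calculate_first_set_sentence_fs elements first_set out) := by unfold Spec_calculate_first_set_sentence_fs; infer_instance

-- ===== CLAIM (what is proved, stated in full; the proofs are below) =====
def Claim_equal_calculate_first_set_sentence_fs : Prop := ∀ (elements : List String) (first_set : List (String × List (Option String))), Dom_calculate_first_set_sentence_fs elements first_set → Pre_calculate_first_set_sentence_fs elements first_set → Spec_calculate_first_set_sentence_fs elements first_set (calculate_first_set_sentence_fs elements first_set)

-- ===== LEMMAS AND PROOFS =====
-- the predicate Set.diff · [none] filters with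
def pvKeep (x : Option String) : Bool := !(([none] : List (Option String)).contains x)

theorem pvUnion_add (s t : List (Option String)) (x : Option String) :
    PySem.Set.union s (PySem.Set.add t x) = PySem.Set.add (PySem.Set.union s t) x := by
  by_cases hm : x ∈ t
  · rw [PySem.Set.add_of_mem hm]
    have hx : x ∈ PySem.Set.union s t := by
      rw [PySem.Set.mem_union]; exact Or.inr hm
    rw [PySem.Set.add_of_mem hx]
  · rw [PySem.Set.add_of_not_mem hm]
    show (t ++ [x]).foldl PySem.Set.add s = _
    rw [List.foldl_append]
    rfl

theorem pvUnion_union (s t u : List (Option String)) :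
    PySem.Set.union (PySem.Set.union s t) u = PySem.Set.union s (PySem.Set.union t u) := by
  induction u generalizing t with
  | nil => rfl
  | cons x u ih =>
    show PySem.Set.union (PySem.Set.add (PySem.Set.union s t) x) u = _
    rw [← pvUnion_add s t x, ih (PySem.Set.add t x)]
    rfl

theorem pvUnion_nil_left (t : List (Option String)) :
    PySem.Set.union [] t = PySem.Set.ofList t := by
  rw [PySem.Set.ofList_eq_foldl]; rfl

theorem pvUnion_ofList (s l : List (Option String)) :
    PySem.Set.union s (PySem.Set.ofList l) = PySem.Set.union s l := by
  rw [← pvUnion_nil_left, ← pvUnion_union]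
  rfl

theorem pvFilter_add (s : List (Option String)) (x : Option String) :
    (PySem.Set.add s x).filter pvKeep =
      if pvKeep x then PySem.Set.add (s.filter pvKeep) x else s.filter pvKeep := by
  by_cases hx : pvKeep x = true
  · rw [if_pos hx]
    by_cases hm : x ∈ s
    · have h1 : PySem.Set.add s x = s := PySem.Set.add_of_mem hm
      have h2 : PySem.Set.add (s.filter pvKeep) x = s.filter pvKeep := by
        apply PySem.Set.add_of_mem
        exact List.mem_filter.mpr ⟨hm, hx⟩
      rw [h1, h2]
    · have h1 : PySem.Set.add s x = s ++ [x] := PySem.Set.add_of_not_mem hm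
      have h2 : PySem.Set.add (s.filter pvKeep) x = s.filter pvKeep ++ [x] := by
        apply PySem.Set.add_of_not_mem
        intro h; exact hm (List.mem_filter.mp h).1
      rw [h1, h2, List.filter_append]
      simp [hx]
  · have hx' : pvKeep x = false := by revert hx; cases pvKeep x <;> simp
    rw [if_neg hx]
    by_cases hm : x ∈ s
    · rw [PySem.Set.add_of_mem hm]
    · rw [PySem.Set.add_of_not_mem hm, List.filter_append]
      simp [hx']

theorem pvFilter_union (t s : List (Option String)) :
    (PySem.Set.union s t).filter pvKeep = PySem.Set.union (s.filter pvKeep) (t.filter pvKeep) := by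
  induction t generalizing s with
  | nil => rfl
  | cons x t ih =>
    show (PySem.Set.union (PySem.Set.add s x) t).filter pvKeep = _
    rw [ih (PySem.Set.add s x), pvFilter_add]
    by_cases hx : pvKeep x = true
    · simp only [hx, if_true, List.filter_cons]
      rfl
    · simp [hx]

theorem pvDiff_eq_filter (s : List (Option String)) :
    PySem.Set.diff s [none] = s.filter pvKeep := rfl

-- the deduplication in B's "fe - {None}" disappears under a union on the left
theorem pvEqU (acc fe : List (Option String)) :
    PySem.Set.union acc (PySem.Set.diff (PySem.Set.ofList fe) [none]) =
      PySem.Set.union acc (PySem.Set.diff fe [none]) := by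
  have h1 : PySem.Set.diff (PySem.Set.ofList fe) [none]
      = PySem.Set.ofList (PySem.Set.diff fe [none]) := by
    rw [pvDiff_eq_filter, pvDiff_eq_filter, ← pvUnion_nil_left, pvFilter_union]
    simp only [List.filter_nil]
    rw [pvUnion_nil_left]
  rw [h1, pvUnion_ofList]

theorem pvMain (fs : List (String × List (Option String))) (es : List String)
    (acc : List (Option String)) :
    pvALoop fs es acc = PySem.Set.union acc (es.foldr (pvG fs) [none]) := by
  induction es generalizing acc with
  | nil => rfl
  | cons e rest ih =>
    simp only [pvALoop, pvG, List.foldr_cons, pvFsGet]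
    cases hcb : ((PySem.Dict.mk fs).getD e []).contains none with
    | true =>
      simp only [Bool.not_true, Bool.false_eq_true, if_false, if_true]
      rw [ih, ← pvUnion_union, pvEqU]
    | false =>
      simp only [Bool.not_false, Bool.false_eq_true, if_false, if_true]
      rw [pvEqU]

theorem pvNodupFoldr (fs : List (String × List (Option String))) (es : List String) :
    (es.foldr (pvG fs) [none]).Nodup := by
  induction es with
  | nil => simp
  | cons e rest ih =>
    simp only [List.foldr_cons]
    unfold pvG
    cases hcb : ((PySem.Dict.mk fs).getD e []).contains none with
    | true =>
      simp only [hcb, if_true]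
      exact PySem.Set.nodup_union _ _
        (List.Nodup.filter _ (PySem.Set.nodup_ofList ((PySem.Dict.mk fs).getD e [])))
    | false =>
      simp only [hcb, Bool.false_eq_true, if_false]
      exact List.Nodup.filter _ (PySem.Set.nodup_ofList ((PySem.Dict.mk fs).getD e []))

-- ===== VERDICT (by name: the statement is the Claim_ definition above) =====
theorem calculate_first_set_sentence_fs_spec : Claim_equal_calculate_first_set_sentence_fs := by
  intro elements first_set _hDom _hPre
  unfold Spec_calculate_first_set_sentence_fs
  unfold calculate_first_set_sentence_fs calculate_first_set_sentence_fs_alt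
  rw [List.foldl_reverse]
  have halt : (fun (x : String) (y : List (Option String)) => pvG first_set x y)
      = pvG first_set := rfl
  rw [halt, pvMain]
  rw [show (PySem.Set.union PySem.Set.empty (elements.foldr (pvG first_set) [none]))
        = PySem.Set.ofList (elements.foldr (pvG first_set) [none]) from
      pvUnion_nil_left _]
  exact PySem.Set.ofList_eq_self_of_nodup _ (pvNodupFoldr first_set elements)
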